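-- pv_equiv track=rewrite | github.com/Prem-Vk/webapp | candidate/views.py | _get_name_combinations
-- ===== SOURCE A (Python) =====
-- def _get_name_combinations(search_keywords):
--     """
--     Generate all possible name combinations (including partial matches) from the search keywords.
--     """
--     combinations = []
--     combinations.append(" ".join(search_keywords))
--     if len(search_keywords) > 1:
--         for i in range(len(search_keywords)):
--             partial_name = " ".join(search_keywords[:i] + search_keywords[i + 1 :])
--             combinations.append(partial_name)
--     return combinations
-- ===== SOURCE B (Python) =====
-- def _get_name_combinations(search_keywords):
--     """
--     Generate the full name plus all leave-one-out combinations using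
--     precomputed prefix and suffix joins instead of per-index slicing.
--     """
--     if len(search_keywords) <= 1:
--         return [" ".join(search_keywords)]
--     n = len(search_keywords)
--     prefixes = [search_keywords[0]]          # prefixes[k] = " ".join(kw[:k+1])
--     for w in search_keywords[1:]:
--         prefixes.append(prefixes[-1] + " " + w)
--     suffixes = [search_keywords[-1]]         # built backwards
--     for w in reversed(search_keywords[:-1]):
--         suffixes.append(w + " " + suffixes[-1])
--     suffixes.reverse()                       # suffixes[k] = " ".join(kw[k:])
--     result = [prefixes[-1], suffixes[1]]     # full name, then leave out index 0
--     for i in range(1, n - 1):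
--         result.append(prefixes[i - 1] + " " + suffixes[i + 1])
--     result.append(prefixes[n - 2])           # leave out last index
--     return result
-- ===== Notes on version B (the rewrite author's own statement) =====
-- stated objective: alternative
-- what changed: Replaces A's per-index slice-and-join loop by two linear passes that precompute joined prefixes and suffixes, so each leave-one-out name is a single concatenation prefixes[i-1] + " " + suffixes[i+1] instead of slicing and rejoining the keyword list.
import Mathlib
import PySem

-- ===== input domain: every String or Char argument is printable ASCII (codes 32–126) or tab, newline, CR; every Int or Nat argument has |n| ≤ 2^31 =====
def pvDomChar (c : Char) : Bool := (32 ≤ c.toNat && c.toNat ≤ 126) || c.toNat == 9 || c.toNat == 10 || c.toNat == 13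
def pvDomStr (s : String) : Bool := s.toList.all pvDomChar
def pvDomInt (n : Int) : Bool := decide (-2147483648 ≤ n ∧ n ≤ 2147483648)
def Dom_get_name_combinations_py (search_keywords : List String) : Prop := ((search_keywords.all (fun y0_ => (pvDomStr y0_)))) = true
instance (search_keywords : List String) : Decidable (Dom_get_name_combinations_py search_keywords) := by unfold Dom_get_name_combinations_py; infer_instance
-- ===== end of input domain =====

-- B replaces A's per-index slice-and-join by precomputed prefix/suffix joins; alternative algorithm, same asymptotic cost.

-- ===== PORT A =====
def get_name_combinations_py (search_keywords : List String) : List String :=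
  -- combinations = []; combinations.append(" ".join(search_keywords))
  let combinations : List String := [] ++ [PySem.Str.join " " search_keywords]
  -- if len(search_keywords) > 1: for i in range(len(...)): append(" ".join(kw[:i] + kw[i+1:]))
  if 1 < (search_keywords.length : Int) then
    (PySem.List.pyRange 0 (search_keywords.length : Int) 1).foldl
      (fun acc i =>
        acc ++ [PySem.Str.join " "
          (PySem.List.slice search_keywords none (some i) ++
           PySem.List.slice search_keywords (some (i + 1)) none)])
      combinations
  else combinations

-- ===== PORT B =====
-- the 'prefixes' loop of Source B: running value p = prefixes[-1], appending p + " " + w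
def pvPrefLoop (p : String) (ws : List String) : List String :=
  match ws with
  | [] => [p]
  | w :: ws => p :: pvPrefLoop (p ++ " " ++ w) ws

-- the 'suffixes' loop of Source B; acc is kept most-recent-first, so the final acc is
-- Source B's suffixes list after its suffixes.reverse()
def pvSufLoop (acc : List String) (ws : List String) : List String :=
  match ws with
  | [] => acc
  | w :: ws => pvSufLoop ((w ++ " " ++ acc.headD "") :: acc) ws

def get_name_combinations_py_alt (search_keywords : List String) : List String :=
  if search_keywords.length ≤ 1 then [PySem.Str.join " " search_keywords]
  else
    let n := search_keywords.length
    let prefixes := pvPrefLoop (search_keywords.headD "") search_keywords.tail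
    let suffixes := pvSufLoop [search_keywords.getLastD ""] search_keywords.dropLast.reverse
    let result : List String := [prefixes.getLastD "", PySem.List.pyGetD suffixes 1 ""]
    let result := (PySem.List.pyRange 1 ((n : Int) - 1) 1).foldl
      (fun acc i =>
        acc ++ [PySem.List.pyGetD prefixes (i - 1) "" ++ " " ++ PySem.List.pyGetD suffixes (i + 1) ""])
      result
    result ++ [PySem.List.pyGetD prefixes ((n : Int) - 2) ""]

-- ===== PRECONDITION & SPEC =====
def Spec_get_name_combinations_py (search_keywords : List String) (out : List String) : Prop := out = get_name_combinations_py_alt search_keywords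
instance (search_keywords : List String) (out : List String) : Decidable (Spec_get_name_combinations_py search_keywords out) := by unfold Spec_get_name_combinations_py; infer_instance

-- ===== CLAIM (what is proved, stated in full; the proofs are below) =====
def Claim_equal_get_name_combinations_py : Prop := ∀ (search_keywords : List String), Dom_get_name_combinations_py search_keywords → Spec_get_name_combinations_py search_keywords (get_name_combinations_py search_keywords)

-- ===== LEMMAS AND PROOFS =====

theorem pv_chars_join_append (sep : List Char) (a b : List (List Char)) (ha : a ≠ []) (hb : b ≠ []) :
    PySem.Chars.join sep (a ++ b) = PySem.Chars.join sep a ++ sep ++ PySem.Chars.join sep b := by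
  induction a with
  | nil => exact absurd rfl ha
  | cons x a ih =>
      cases a with
      | nil =>
          cases b with
          | nil => exact absurd rfl hb
          | cons y b =>
              simpa [PySem.Chars.join_singleton] using PySem.Chars.join_cons_cons sep x y b
      | cons y a =>
          rw [List.cons_append, List.cons_append, PySem.Chars.join_cons_cons,
            PySem.Chars.join_cons_cons, ← List.cons_append, ih (by simp)]
          simp [List.append_assoc]

theorem pv_join_append (a b : List String) (ha : a ≠ []) (hb : b ≠ []) :
    PySem.Str.join " " (a ++ b) = PySem.Str.join " " a ++ " " ++ PySem.Str.join " " b := by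
  apply String.toList_inj.mp
  simp only [String.toList_append, PySem.Str.toList_join, List.map_append]
  exact pv_chars_join_append _ _ _ (by simpa) (by simpa)

theorem pv_join_singleton (w : String) : PySem.Str.join " " [w] = w := by
  apply String.toList_inj.mp
  simp [PySem.Str.toList_join, PySem.Chars.join_singleton]

theorem pv_join_cons (w : String) (ys : List String) (hy : ys ≠ []) :
    PySem.Str.join " " (w :: ys) = w ++ " " ++ PySem.Str.join " " ys := by
  have := pv_join_append [w] ys (by simp) hy
  simpa [pv_join_singleton] using this

theorem pvPrefLoop_spec : ∀ (ws as : List String), as ≠ [] →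
    pvPrefLoop (PySem.Str.join " " as) ws
      = (List.range (ws.length + 1)).map (fun k => PySem.Str.join " " (as ++ ws.take k)) := by
  intro ws
  induction ws with
  | nil => intro as _; simp [pvPrefLoop]
  | cons w ws ih =>
      intro as ha
      show PySem.Str.join " " as :: pvPrefLoop (PySem.Str.join " " as ++ " " ++ w) ws = _
      have h1 : PySem.Str.join " " as ++ " " ++ w = PySem.Str.join " " (as ++ [w]) := by
        rw [pv_join_append as [w] ha (by simp), pv_join_singleton]
      rw [h1, ih (as ++ [w]) (by simp)]
      conv_rhs => rw [List.length_cons, List.range_succ_eq_map, List.range_succ_eq_map]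
      simp only [List.map_map, Function.comp_def, List.take_succ_cons, List.append_assoc,
        List.map_cons, List.take_zero, List.append_nil]
      rw [List.range_succ_eq_map]
      simp [List.map_map, Function.comp_def]

-- suffix characterisation: S ys = (range |ys|).map (k ↦ join (ys.drop k))
theorem pvSufLoop_spec : ∀ (ws ys : List String), ys ≠ [] →
    pvSufLoop ((List.range ys.length).map (fun k => PySem.Str.join " " (ys.drop k))) ws
      = (List.range (ws.reverse ++ ys).length).map
          (fun k => PySem.Str.join " " ((ws.reverse ++ ys).drop k)) := by
  intro ws
  induction ws with
  | nil => intro ys _; simp [pvSufLoop]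
  | cons w ws ih =>
      intro ys hy
      show pvSufLoop (_ :: _) ws = _
      have hhead :
          (((List.range ys.length).map (fun k => PySem.Str.join " " (ys.drop k))).headD "")
            = PySem.Str.join " " ys := by
        cases ys with
        | nil => exact absurd rfl hy
        | cons y ys => simp [List.range_succ_eq_map]
      have hstep :
          (w ++ " " ++ ((List.range ys.length).map (fun k => PySem.Str.join " " (ys.drop k))).headD "")
              :: (List.range ys.length).map (fun k => PySem.Str.join " " (ys.drop k))
            = (List.range (w :: ys).length).map (fun k => PySem.Str.join " " ((w :: ys).drop k)) := by
        rw [hhead, List.length_cons, List.range_succ_eq_map]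
        simp [List.map_map, Function.comp, pv_join_cons w ys hy]
      rw [hstep, ih (w :: ys) (by simp)]
      simp [List.append_assoc]

theorem pv_foldl_append_map {α β : Type} (l : List α) (f : α → β) (init : List β) :
    l.foldl (fun acc i => acc ++ [f i]) init = init ++ l.map f := by
  induction l generalizing init with
  | nil => simp
  | cons a l ih => simp [ih]

theorem pv_getLastD_map_range {β : Type} (f : Nat → β) (m : Nat) (d : β) (hm : 0 < m) :
    (((List.range m).map f).getLastD d) = f (m - 1) := by
  obtain ⟨m', rfl⟩ : ∃ m', m = m' + 1 := ⟨m - 1, by omega⟩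
  rw [List.range_succ]
  simp

theorem get_name_combinations_py_spec : Claim_equal_get_name_combinations_py := by
  intro kw _
  unfold Spec_get_name_combinations_py get_name_combinations_py get_name_combinations_py_alt
  match kw with
  | [] => simp
  | [x] => simp
  | x :: y :: rest =>
    set kw := x :: y :: rest with hkw
    have hn : kw.length = rest.length + 2 := by simp [hkw]
    have h1 : (1 : Int) < (kw.length : Int) := by rw [hn]; push_cast; omega
    have hle : ¬ kw.length ≤ 1 := by omega
    simp only [h1, hle, if_true, if_false]
    -- A side: foldl → map over range, slices → take/drop
    rw [pv_foldl_append_map, PySem.List.pyRange_one, List.map_map]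
    simp only [Function.comp_def, Int.zero_add, Int.sub_zero, Int.toNat_natCast]
    have hAmap : ∀ k ∈ List.range kw.length,
        PySem.Str.join " "
          (PySem.List.slice kw none (some (k : Int)) ++
           PySem.List.slice kw (some ((k : Int) + 1)) none)
        = PySem.Str.join " " (kw.take k ++ kw.drop (k + 1)) := by
      intro k _
      have : (k : Int) + 1 = ((k + 1 : Nat) : Int) := by push_cast; ring
      rw [PySem.List.slice_to_natCast, this, PySem.List.slice_from_natCast]
    rw [List.map_congr_left hAmap]
    -- B side: characterise prefixes and suffixes
    have hpref : pvPrefLoop (kw.headD "") kw.tail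
        = (List.range kw.length).map (fun k => PySem.Str.join " " (kw.take (k + 1))) := by
      have : kw.headD "" = PySem.Str.join " " [x] := by simp [hkw, pv_join_singleton]
      rw [hkw] at this ⊢
      rw [this]
      show pvPrefLoop (PySem.Str.join " " [x]) (y :: rest) = _
      rw [pvPrefLoop_spec (y :: rest) [x] (by simp)]
      simp [List.take_succ_cons]
    have hsuf : pvSufLoop [kw.getLastD ""] kw.dropLast.reverse
        = (List.range kw.length).map (fun k => PySem.Str.join " " (kw.drop k)) := by
      have hne : kw ≠ [] := by simp [hkw]
      have hlast : [kw.getLastD ""]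
          = (List.range ([kw.getLast hne]).length).map
              (fun k => PySem.Str.join " " (([kw.getLast hne]).drop k)) := by
        simp [List.getLastD_eq_getLast?, List.getLast?_eq_some_getLast hne, pv_join_singleton]
      rw [hlast, pvSufLoop_spec kw.dropLast.reverse [kw.getLast hne] (by simp),
        List.reverse_reverse, List.dropLast_append_getLast hne]
    rw [hpref, hsuf, pv_foldl_append_map, PySem.List.pyRange_one]
    -- evaluate the three kinds of lookups
    have hnpos : 0 < kw.length := by omega
    rw [pv_getLastD_map_range _ _ _ hnpos]
    have hfull : PySem.Str.join " " (kw.take (kw.length - 1 + 1)) = PySem.Str.join " " kw := by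
      have : kw.length - 1 + 1 = kw.length := by omega
      rw [this, List.take_length]
    rw [hfull]
    rw [PySem.List.pyGetD_ofNat']
    have hb1 : 1 < kw.length := by rw [hn]; omega
    rw [PySem.List.getD_map_range _ _ _ _ hb1]
    have hlastIdx : ((kw.length : Int) - 2) = ((kw.length - 2 : Nat) : Int) := by
      rw [hn]; push_cast; omega
    have hb2 : kw.length - 2 < kw.length := by rw [hn]; omega
    rw [hlastIdx, PySem.List.pyGetD_natCast, PySem.List.getD_map_range _ _ _ _ hb2]
    have hr2 : (((kw.length : Int) - 1) - 1).toNat = rest.length := by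
      rw [hn]; push_cast; omega
    rw [List.map_map]
    simp only [Function.comp_def]
    rw [hr2]
    have hmid : ∀ k ∈ List.range rest.length,
        (PySem.List.pyGetD
            ((List.range kw.length).map (fun k => PySem.Str.join " " (kw.take (k + 1))))
            ((1 : Int) + (k : Int) - 1) ""
          ++ " " ++
          PySem.List.pyGetD
            ((List.range kw.length).map (fun k => PySem.Str.join " " (kw.drop k)))
            ((1 : Int) + (k : Int) + 1) "")
        = PySem.Str.join " " (kw.take (k + 1) ++ kw.drop (k + 2)) := by
      intro k hk
      have hkn : k < rest.length := List.mem_range.mp hk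
      have e1 : (1 : Int) + (k : Int) - 1 = ((k : Nat) : Int) := by ring
      have e2 : (1 : Int) + (k : Int) + 1 = ((k + 2 : Nat) : Int) := by push_cast; ring
      have hb3 : k < kw.length := by rw [hn]; omega
      have hb4 : k + 2 < kw.length := by rw [hn]; omega
      rw [e1, e2, PySem.List.pyGetD_natCast, PySem.List.pyGetD_natCast,
        PySem.List.getD_map_range _ _ _ _ hb3, PySem.List.getD_map_range _ _ _ _ hb4]
      rw [pv_join_append (kw.take (k + 1)) (kw.drop (k + 2)) ?_ ?_]
      · have h1 : (kw.take (k + 1)).length = k + 1 := by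
          rw [List.length_take]; omega
        intro h; rw [h] at h1; simp at h1
      · have h2 : (kw.drop (k + 2)).length = kw.length - (k + 2) := by
          rw [List.length_drop]
        intro h; rw [h] at h2; simp at h2; rw [hn] at h2; omega
    rw [List.map_congr_left hmid]
    -- align the ranges and compare elementwise
    rw [hn]
    have hsplit : List.range (rest.length + 2)
        = 0 :: ((List.range rest.length).map Nat.succ ++ [rest.length + 1]) := by
      rw [List.range_succ, List.range_succ_eq_map]
      simp
    rw [hsplit]
    have hdropLast : kw.drop (rest.length + 1 + 1) = [] := by
      apply List.drop_eq_nil_of_le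
      rw [hn]
    simp only [List.map_cons, List.map_append, List.map_map, Function.comp_def,
      List.take_zero, List.nil_append, List.cons_append, Nat.succ_eq_add_one]
    rw [hdropLast, List.append_nil]
    rfl
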